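-- pv_equiv track=rewrite | github.com/yugotakada/FWO-color-code | src/FWO_color_code_488_cond_error.py | reorder_list_len4_elements_after
-- ===== SOURCE A (Python) =====
-- def reorder_list_len4_elements_after(input_list):
--     output = []
--     for i in range(0, len(input_list), 4):
--         chunk = input_list[i:i + 4]
--         if len(chunk) == 4:
--             reordered_chunk = [chunk[1], chunk[3], chunk[2], chunk[0]]
--             output.extend(reordered_chunk)
--
--     return output
-- ===== SOURCE B (Python) =====
-- def reorder_list_len4_elements_after(input_list):
--     output = []
--     for a, b, c, d in zip(input_list[1::4], input_list[3::4], input_list[2::4], input_list[0::4]):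
--         output.extend((a, b, c, d))
--     return output
-- ===== Notes on version B (the rewrite author's own statement) =====
-- stated objective: alternative
-- what changed: Replaces the explicit chunk loop (slice each 4-chunk, guard len==4, append a reordered copy) by zipping four strided slices input_list[1::4], [3::4], [2::4], [0::4] and flattening the resulting quadruples in one pass; zip's shortest-length truncation subsumes the length guard.
import Mathlib
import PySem

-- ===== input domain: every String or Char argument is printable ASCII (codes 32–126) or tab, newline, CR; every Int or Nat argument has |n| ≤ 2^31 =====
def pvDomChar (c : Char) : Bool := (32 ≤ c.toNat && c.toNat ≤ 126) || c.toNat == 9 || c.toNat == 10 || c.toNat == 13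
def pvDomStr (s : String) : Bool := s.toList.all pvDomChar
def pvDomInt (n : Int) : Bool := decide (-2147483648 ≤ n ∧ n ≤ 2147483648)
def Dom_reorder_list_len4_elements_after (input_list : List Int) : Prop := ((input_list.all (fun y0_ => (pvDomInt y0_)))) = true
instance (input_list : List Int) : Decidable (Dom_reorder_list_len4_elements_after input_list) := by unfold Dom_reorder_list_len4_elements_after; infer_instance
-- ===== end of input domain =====

-- B replaces A's chunk loop by zipping four strided slices (zip's shortest-length truncation
-- plays the role of A's len(chunk)==4 guard); objective: alternative decomposition.


-- ===== PORT A =====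
-- Transliteration of A: loop over range(0, len, 4), slice the 4-chunk, guard on its length,
-- append the reordered chunk.  chunk[i] is only evaluated when len(chunk) == 4, so the
-- Python indexing never raises; pyGetD's default 0 is unreachable.
def reorder_list_len4_elements_after (input_list : List Int) : List Int :=
  (PySem.List.pyRange 0 (input_list.length : Int) 4).foldl
    (fun output i =>
      let chunk := PySem.List.slice input_list (some i) (some (i + 4))
      if chunk.length = 4 then
        output ++ [PySem.List.pyGetD chunk 1 0, PySem.List.pyGetD chunk 3 0,
                   PySem.List.pyGetD chunk 2 0, PySem.List.pyGetD chunk 0 0]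
      else output) []

-- ===== PORT B =====
-- Transliteration of B: the four strided slices input_list[1::4], [3::4], [2::4], [0::4],
-- zipped (zip truncates to the shortest), then one pass extending the output by (a,b,c,d).
-- slice? returns `some` whenever the step is nonzero, so `.getD []` never supplies its default.
def reorder_list_len4_elements_after_alt (input_list : List Int) : List Int :=
  let s1 := (PySem.List.slice? input_list (some 1) none 4).getD []
  let s3 := (PySem.List.slice? input_list (some 3) none 4).getD []
  let s2 := (PySem.List.slice? input_list (some 2) none 4).getD []
  let s0 := (PySem.List.slice? input_list (some 0) none 4).getD []
  (s1.zip (s3.zip (s2.zip s0))).foldl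
    (fun output p => output ++ [p.1, p.2.1, p.2.2.1, p.2.2.2]) []

-- ===== PRECONDITION & SPEC =====
def Spec_reorder_list_len4_elements_after (input_list : List Int) (out : List Int) : Prop := out = reorder_list_len4_elements_after_alt input_list
instance (input_list : List Int) (out : List Int) : Decidable (Spec_reorder_list_len4_elements_after input_list out) := by unfold Spec_reorder_list_len4_elements_after; infer_instance

-- ===== CLAIM (what is proved, stated in full; the proofs are below) =====
def Claim_equal_reorder_list_len4_elements_after : Prop := ∀ (input_list : List Int), Dom_reorder_list_len4_elements_after input_list → Spec_reorder_list_len4_elements_after input_list (reorder_list_len4_elements_after input_list)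

-- ===== LEMMAS AND PROOFS =====

-- Common reference form of the result: peel one 4-chunk at a time.
def pvChunkRec : List Int → List Int
  | w :: x :: y :: z :: rest => x :: z :: y :: w :: pvChunkRec rest
  | _ => []

-- range(a, b, 4) induction forms
theorem pvRange4_nil (a b : Int) (h : b ≤ a) : PySem.List.pyRange a b 4 = [] := by
  rw [PySem.List.pyRange_of_pos a b (by norm_num)]
  simp [if_neg (by omega : ¬ a < b)]

theorem pvRange4_cons (a b : Int) (h : a < b) :
    PySem.List.pyRange a b 4 = a :: PySem.List.pyRange (a + 4) b 4 := by
  rw [PySem.List.pyRange_of_pos a b (by norm_num), PySem.List.pyRange_of_pos (a+4) b (by norm_num)]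
  rw [if_pos h]
  by_cases h4 : a + 4 < b
  · rw [if_pos h4]
    have hm : ((b - a + 4 - 1)/4).toNat = ((b - (a+4) + 4 - 1)/4).toNat + 1 := by omega
    rw [hm, List.range_succ_eq_map]
    simp [List.map_map]
    intro k _
    ring
  · rw [if_neg h4]
    have hm : ((b - a + 4 - 1)/4).toNat = 1 := by omega
    rw [hm]
    simp

theorem pvGet4 (w x y z : Int) (rest : List Int) (n : Nat) :
    (w::x::y::z::rest)[n+4]? = rest[n]? := by
  have e : n + 4 = n+1+1+1+1 := by omega
  rw [e]
  simp [List.getElem?_cons_succ]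

-- strided slice xs[a::4]: empty when the start falls at or past the end
theorem pvStride_nil (xs : List Int) (a : Nat) (h : xs.length ≤ a) :
    PySem.List.slice? xs (some (a : Int)) none 4 = some [] := by
  simp [PySem.List.slice?, PySem.List.sliceIndices]
  intro k hk
  omega

-- strided slice xs[a::4] (a < 4) on a list of length ≥ 4: head plus the stride of the tail
theorem pvStride_cons (a : Nat) (ha : a < 4) (w x y z : Int) (rest : List Int) :
    PySem.List.slice? (w :: x :: y :: z :: rest) (some (a : Int)) none 4 =
      some ((w :: x :: y :: z :: rest).getD a 0 ::
            (PySem.List.slice? rest (some (a : Int)) none 4).getD []) := by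
  simp only [PySem.List.slice?, PySem.List.sliceIndices, if_neg (by norm_num : ¬ (4:Int) = 0)]
  simp only [List.length_cons, Option.getD_some]
  have h0 : ¬ ((a:Int) < 0) := by omega
  simp only [if_neg h0, if_neg (by norm_num : ¬ (4:Int) < 0), if_pos (by norm_num : (0:Int) < 4)]
  push_cast
  set n := rest.length with hn
  have hmin : min (a:Int) ((n:Int)+1+1+1+1) = (a:Int) := by omega
  rw [hmin]
  have hC : (if (a:Int) < (n:Int)+1+1+1+1 then ((((n:Int)+1+1+1+1 - a) + 4 - 1) / 4).toNat else 0)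
      = (if (min (a:Int) (n:Int)) < (n:Int) then ((((n:Int) - min (a:Int) (n:Int)) + 4 - 1) / 4).toNat else 0) + 1 := by
    split_ifs <;> omega
  rw [hC, List.range_succ_eq_map, List.filterMap_cons]
  have hhead : (w::x::y::z::rest)[((a:Int) + 4 * (0:Nat)).toNat]? = some ((w::x::y::z::rest).getD a 0) := by
    have e : ((a:Int) + 4 * ((0:Nat):Int)).toNat = a := by omega
    rw [e]
    rw [List.getD_eq_getElem?_getD]
    rw [List.getElem?_eq_getElem (by simp; omega)]
    simp
  rw [hhead]
  simp only [List.filterMap_map, Option.some.injEq, List.cons.injEq, true_and]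
  by_cases hle : a ≤ n
  · have hmin2 : min (a:Int) (n:Int) = (a:Int) := by omega
    rw [hmin2]
    apply List.filterMap_congr
    intro k _
    simp only [Function.comp]
    have e1 : ((a:Int) + 4 * ((k+1 : Nat):Int)).toNat = (a + 4*k) + 4 := by omega
    have e2 : ((a:Int) + 4 * ((k : Nat):Int)).toNat = a + 4*k := by omega
    rw [e1, e2, pvGet4]
  · have hm0 : (if (min (a:Int) (n:Int)) < (n:Int) then ((((n:Int) - min (a:Int) (n:Int)) + 4 - 1) / 4).toNat else 0) = 0 := by
      split_ifs <;> omega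
    rw [hm0]
    simp

-- A's loop, generalized over the loop counter and accumulator
theorem pvLoopA (k : Nat) (ys : List Int) (j : Nat) (acc : List Int)
    (hk : ys.length - j ≤ k) :
    (PySem.List.pyRange (j : Int) (ys.length : Int) 4).foldl
      (fun output i =>
        let chunk := PySem.List.slice ys (some i) (some (i + 4))
        if chunk.length = 4 then
          output ++ [PySem.List.pyGetD chunk 1 0, PySem.List.pyGetD chunk 3 0,
                     PySem.List.pyGetD chunk 2 0, PySem.List.pyGetD chunk 0 0]
        else output) acc = acc ++ pvChunkRec (ys.drop j) := by
  induction k generalizing j acc with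
  | zero =>
    have hj : ¬ j < ys.length := by omega
    rw [pvRange4_nil _ _ (by exact_mod_cast Nat.cast_le.mpr (by omega))]
    rw [List.drop_eq_nil_of_le (by omega)]
    simp [pvChunkRec]
  | succ k ih =>
    by_cases hj : j < ys.length
    · rw [pvRange4_cons _ _ (by exact_mod_cast hj), List.foldl_cons]
      have hcast : ((j:Int) + 4) = ((j + 4 : Nat) : Int) := by push_cast; ring
      have hchunk : PySem.List.slice ys (some (j:Int)) (some ((j:Int) + 4)) = (ys.drop j).take 4 := by
        rw [show ((j:Int) + 4) = ((j:Int) + ((4:Nat):Int)) by norm_num]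
        exact PySem.List.slice_natCast_add ys j 4
      have hdrop : ys.drop (j + 4) = (ys.drop j).drop 4 := by
        rw [List.drop_drop]
      have hlen : (ys.drop j).length = ys.length - j := List.length_drop ..
      simp only [hchunk]
      rcases h4 : ys.drop j with _ | ⟨a1, _ | ⟨a2, _ | ⟨a3, _ | ⟨a4, rest⟩⟩⟩⟩
      · exfalso
        rw [h4] at hlen
        simp at hlen
        omega
      · simp only [show List.take 4 [a1] = [a1] from rfl]
        rw [if_neg (by simp)]
        rw [hcast, ih (j+4) acc (by omega), hdrop, h4]
        simp [pvChunkRec]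
      · simp only [show List.take 4 [a1, a2] = [a1, a2] from rfl]
        rw [if_neg (by simp)]
        rw [hcast, ih (j+4) acc (by omega), hdrop, h4]
        simp [pvChunkRec]
      · simp only [show List.take 4 [a1, a2, a3] = [a1, a2, a3] from rfl]
        rw [if_neg (by simp)]
        rw [hcast, ih (j+4) acc (by omega), hdrop, h4]
        simp [pvChunkRec]
      · simp only [show List.take 4 (a1::a2::a3::a4::rest) = [a1,a2,a3,a4] from rfl]
        rw [if_pos (by simp)]
        have g1 : PySem.List.pyGetD [a1,a2,a3,a4] 1 0 = a2 := by
          simp [PySem.List.pyGetD, PySem.List.pyGet?, PySem.List.pyIdx?]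
        have g3 : PySem.List.pyGetD [a1,a2,a3,a4] 3 0 = a4 := by
          simp [PySem.List.pyGetD, PySem.List.pyGet?, PySem.List.pyIdx?]
        have g2 : PySem.List.pyGetD [a1,a2,a3,a4] 2 0 = a3 := by
          simp [PySem.List.pyGetD, PySem.List.pyGet?, PySem.List.pyIdx?]
        have g0 : PySem.List.pyGetD [a1,a2,a3,a4] 0 0 = a1 := by
          simp [PySem.List.pyGetD, PySem.List.pyGet?, PySem.List.pyIdx?]
        rw [g1, g3, g2, g0]
        rw [hcast, ih (j+4) (acc ++ [a2, a4, a3, a1]) (by omega), hdrop, h4]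
        simp [pvChunkRec]
    · rw [pvRange4_nil _ _ (by exact_mod_cast Nat.cast_le.mpr (by omega))]
      rw [List.drop_eq_nil_of_le (by omega)]
      simp [pvChunkRec]

theorem pvA_eq (xs : List Int) : reorder_list_len4_elements_after xs = pvChunkRec xs := by
  unfold reorder_list_len4_elements_after
  have h := pvLoopA xs.length xs 0 [] (by omega)
  simpa using h

-- pulling the accumulator out of B's fold
theorem pvFoldExt (l : List (Int × Int × Int × Int)) (acc : List Int) :
    l.foldl (fun output p => output ++ [p.1, p.2.1, p.2.2.1, p.2.2.2]) acc
      = acc ++ l.foldl (fun output p => output ++ [p.1, p.2.1, p.2.2.1, p.2.2.2]) [] := by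
  induction l generalizing acc with
  | nil => simp
  | cons p l ih => rw [List.foldl_cons, List.foldl_cons, ih, ih ([] ++ _)]; simp

theorem pvB_aux (k : Nat) : ∀ xs : List Int, xs.length ≤ k →
    reorder_list_len4_elements_after_alt xs = pvChunkRec xs := by
  induction k with
  | zero =>
    intro xs h
    have : xs = [] := by
      cases xs
      · rfl
      · simp at h
    subst this
    rfl
  | succ k ih =>
    intro xs h
    rcases xs with _ | ⟨a1, _ | ⟨a2, _ | ⟨a3, _ | ⟨a4, rest⟩⟩⟩⟩
    · simp only [reorder_list_len4_elements_after_alt]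
      rw [show (3:Int) = ((3:Nat):Int) from by norm_num]
      rw [pvStride_nil _ 3 (by simp)]
      simp [pvChunkRec]
    · simp only [reorder_list_len4_elements_after_alt]
      rw [show (3:Int) = ((3:Nat):Int) from by norm_num]
      rw [pvStride_nil _ 3 (by simp)]
      simp [pvChunkRec]
    · simp only [reorder_list_len4_elements_after_alt]
      rw [show (3:Int) = ((3:Nat):Int) from by norm_num]
      rw [pvStride_nil _ 3 (by simp)]
      simp [pvChunkRec]
    · simp only [reorder_list_len4_elements_after_alt]
      rw [show (3:Int) = ((3:Nat):Int) from by norm_num]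
      rw [pvStride_nil _ 3 (by simp)]
      simp [pvChunkRec]
    · simp only [reorder_list_len4_elements_after_alt]
      rw [show (1:Int) = ((1:Nat):Int) from by norm_num,
          show (3:Int) = ((3:Nat):Int) from by norm_num,
          show (2:Int) = ((2:Nat):Int) from by norm_num,
          show (0:Int) = ((0:Nat):Int) from by norm_num]
      rw [pvStride_cons 1 (by norm_num), pvStride_cons 3 (by norm_num),
          pvStride_cons 2 (by norm_num), pvStride_cons 0 (by norm_num)]
      simp only [Option.getD_some]
      simp only [show (a1::a2::a3::a4::rest).getD 1 0 = a2 from rfl,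
                 show (a1::a2::a3::a4::rest).getD 3 0 = a4 from rfl,
                 show (a1::a2::a3::a4::rest).getD 2 0 = a3 from rfl,
                 show (a1::a2::a3::a4::rest).getD 0 0 = a1 from rfl]
      rw [List.zip_cons_cons, List.zip_cons_cons, List.zip_cons_cons, List.foldl_cons]
      rw [pvFoldExt]
      have hrec := ih rest (by simp at h; omega)
      simp only [reorder_list_len4_elements_after_alt] at hrec
      rw [show (1:Int) = ((1:Nat):Int) from by norm_num,
          show (3:Int) = ((3:Nat):Int) from by norm_num,
          show (2:Int) = ((2:Nat):Int) from by norm_num,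
          show (0:Int) = ((0:Nat):Int) from by norm_num] at hrec
      rw [hrec]
      simp [pvChunkRec]

theorem pvB_eq (xs : List Int) : reorder_list_len4_elements_after_alt xs = pvChunkRec xs :=
  pvB_aux xs.length xs (by omega)

-- ===== VERDICT (by name: the statement is the Claim_ definition above) =====
theorem reorder_list_len4_elements_after_spec : Claim_equal_reorder_list_len4_elements_after := by
  intro xs _
  unfold Spec_reorder_list_len4_elements_after
  rw [pvA_eq, pvB_eq]
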